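-- pv_equiv track=rewrite | github.com/jiuisdisciple/CAGtoJSON | json_analysis_reformed.py | merge_segment_codes
-- ===== SOURCE A (Python) =====
-- def merge_segment_codes(segments_with_types):
--     hierarchy = {"A": 0, "B1": 1, "B2": 2, "C": 3}
--     merged_segments = {}
--
--     for segment_code, lesion_type in segments_with_types:
--         if segment_code in merged_segments:
--             merged_segments[segment_code] = max(merged_segments[segment_code], lesion_type, key=lambda t: hierarchy[t])
--         else:
--             merged_segments[segment_code] = lesion_type
--
--     return [[code, type_] for code, type_ in merged_segments.items()]
-- ===== SOURCE B (Python) =====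
-- def merge_segment_codes(segments_with_types):
--     hierarchy = {"A": 0, "B1": 1, "B2": 2, "C": 3}
--     groups = {}
--     for segment_code, lesion_type in segments_with_types:
--         groups.setdefault(segment_code, []).append(lesion_type)
--     result = []
--     for code, group in groups.items():
--         cur = group[0]
--         for t in group[1:]:
--             cur = max(cur, t, key=lambda x: hierarchy[x])
--         result.append([code, cur])
--     return result
-- ===== Notes on version B (the rewrite author's own statement) =====
-- stated objective: alternative
-- what changed: B replaces A's single running-max dict fold with a two-phase group-then-reduce: first build a dict of each code's lesion types in appearance order, then fold each group from its first element to the highest-priority type.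
import Mathlib
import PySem

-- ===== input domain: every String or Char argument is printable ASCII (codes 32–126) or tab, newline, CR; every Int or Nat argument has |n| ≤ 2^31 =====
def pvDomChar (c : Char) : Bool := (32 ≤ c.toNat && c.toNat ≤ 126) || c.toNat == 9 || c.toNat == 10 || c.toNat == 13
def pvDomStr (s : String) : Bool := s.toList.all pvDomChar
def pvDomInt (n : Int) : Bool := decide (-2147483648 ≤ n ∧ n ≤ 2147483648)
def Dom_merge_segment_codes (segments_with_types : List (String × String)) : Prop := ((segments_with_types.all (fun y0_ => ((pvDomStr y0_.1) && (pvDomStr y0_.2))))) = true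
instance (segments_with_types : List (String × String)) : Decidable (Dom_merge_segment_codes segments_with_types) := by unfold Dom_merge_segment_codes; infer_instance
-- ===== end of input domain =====

-- B merges each segment's lesion types by grouping first and then reducing every group
-- from its first element, instead of A's running-max dict fold; return values agree on Pre_.

-- hierarchy = {"A": 0, "B1": 1, "B2": 2, "C": 3}  (shared constant of both Pythons)
def pvHierarchy : PySem.Dict String Int :=
  PySem.Dict.ofList [("A", 0), ("B1", 1), ("B2", 2), ("C", 3)]

-- max(a, b, key=lambda t: hierarchy[t]): b wins only on a strictly larger key; the
-- KeyError of hierarchy[t] on a missing key is excluded by Pre_ (getD's default is never used there).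
def pvHMax (a b : String) : String :=
  if pvHierarchy.getD b 0 > pvHierarchy.getD a 0 then b else a

-- ===== PORT A =====
-- 'if segment_code in merged_segments: … merged_segments[segment_code] …' ported as one
-- match on get? (contains + subscript read of the same key).
def merge_segment_codes (segments_with_types : List (String × String)) : List (List String) :=
  let merged := segments_with_types.foldl
    (fun d p =>
      match d.get? p.1 with
      | some old => d.insert p.1 (pvHMax old p.2)
      | none => d.insert p.1 p.2)
    PySem.Dict.empty
  merged.items.map (fun p => [p.1, p.2])

-- ===== PORT B =====
-- cur = group[0]; for t in group[1:]: cur = max(cur, t, …).  Groups are always nonempty;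
-- the [] branch (Python's IndexError on group[0]) is unreachable.
def pvReduceGroup (group : List String) : String :=
  match group with
  | [] => ""
  | h :: tl => tl.foldl (fun cur t => pvHMax cur t) h

-- groups.setdefault(code, []).append(t) is Dict.modify code [] (· ++ [t]).
def merge_segment_codes_alt (segments_with_types : List (String × String)) : List (List String) :=
  let groups := segments_with_types.foldl
    (fun d p => d.modify p.1 [] (fun g => g ++ [p.2]))
    PySem.Dict.empty
  groups.items.map (fun p => [p.1, pvReduceGroup p.2])

-- ===== PRECONDITION & SPEC =====
-- Pre_ excludes exactly the inputs on which Python A raises KeyError: a pair whose segment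
-- code occurs more than once but whose lesion type is not a hierarchy key (B raises there too).
def Pre_merge_segment_codes (segments_with_types : List (String × String)) : Prop :=
  ∀ p ∈ segments_with_types,
    2 ≤ (segments_with_types.map Prod.fst).count p.1 → pvHierarchy.contains p.2 = true
instance (segments_with_types : List (String × String)) : Decidable (Pre_merge_segment_codes segments_with_types) := by unfold Pre_merge_segment_codes; infer_instance

def pvWitness_merge_segment_codes : (List (String × String)) :=
  [("s1", "A"), ("s1", "C"), ("s2", "?")]

def Spec_merge_segment_codes (segments_with_types : List (String × String)) (out : List (List String)) : Prop := out = merge_segment_codes_alt segments_with_types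
instance (segments_with_types : List (String × String)) (out : List (List String)) : Decidable (Spec_merge_segment_codes segments_with_types out) := by unfold Spec_merge_segment_codes; infer_instance

-- ===== CLAIM (what is proved, stated in full; the proofs are below) =====
def Claim_equal_merge_segment_codes : Prop := ∀ (segments_with_types : List (String × String)), Dom_merge_segment_codes segments_with_types → Pre_merge_segment_codes segments_with_types → Spec_merge_segment_codes segments_with_types (merge_segment_codes segments_with_types)

-- ===== LEMMAS AND PROOFS =====

-- value A's step would store at key p.1
def pvValA (d : PySem.Dict String String) (p : String × String) : String :=
  match d.get? p.1 with
  | some old => pvHMax old p.2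
  | none => p.2

-- A's running max as an Option fold (none = key not yet seen)
def pvRedo (o : Option String) (ts : List String) : Option String :=
  ts.foldl (fun acc t => match acc with | some cur => some (pvHMax cur t) | none => some t) o

theorem pvStepA_eq (d : PySem.Dict String String) (p : String × String) :
    (match d.get? p.1 with
      | some old => d.insert p.1 (pvHMax old p.2)
      | none => d.insert p.1 p.2) = d.insert p.1 (pvValA d p) := by
  cases h : d.get? p.1 <;> simp [pvValA, h]

theorem pvFoldA_eq (l : List (String × String)) (d : PySem.Dict String String) :
    l.foldl (fun d p =>
      match d.get? p.1 with
      | some old => d.insert p.1 (pvHMax old p.2)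
      | none => d.insert p.1 p.2) d
    = l.foldl (fun d p => d.insert p.1 (pvValA d p)) d := by
  have h : (fun (d : PySem.Dict String String) (p : String × String) =>
      match d.get? p.1 with
      | some old => d.insert p.1 (pvHMax old p.2)
      | none => d.insert p.1 p.2)
      = fun d p => d.insert p.1 (pvValA d p) := by
    funext d p; exact pvStepA_eq d p
  rw [h]

theorem pvGetA (c : String) :
    ∀ (l : List (String × String)) (d : PySem.Dict String String),
      (l.foldl (fun d p => d.insert p.1 (pvValA d p)) d).get? c
      = pvRedo (d.get? c) ((l.filter (fun p => p.1 == c)).map (·.2)) := by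
  intro l
  induction l with
  | nil => intro d; rfl
  | cons p l ih =>
    intro d
    by_cases hc : p.1 = c
    · simp only [List.foldl_cons, List.filter_cons, hc, beq_self_eq_true, if_true,
        List.map_cons, ih, pvRedo, List.foldl_cons]
      have hg : (d.insert c (pvValA d p)).get? c = some (pvValA d p) :=
        PySem.Dict.get?_insert_self d c (pvValA d p)
      rw [hg]
      have : pvValA d p = match d.get? c with
        | some old => pvHMax old p.2
        | none => p.2 := by simp [pvValA, hc]
      rw [this]
      cases d.get? c <;> rfl
    · have hb : (p.1 == c) = false := by simp [hc]
      simp only [List.foldl_cons, List.filter_cons, hb, if_neg, Bool.false_eq_true,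
        not_false_iff, ih]
      rw [PySem.Dict.get?_insert_of_ne d (pvValA d p) (fun h => hc h.symm)]

theorem pvRedo_some (ts : List String) : ∀ v, pvRedo (some v) ts = some (ts.foldl (fun cur t => pvHMax cur t) v) := by
  induction ts with
  | nil => intro v; rfl
  | cons t ts ih => intro v; simpa [pvRedo, List.foldl_cons] using ih (pvHMax v t)

-- ===== VERDICT (by name: the statement is the Claim_ definition above) =====
theorem merge_segment_codes_spec : Claim_equal_merge_segment_codes := by
  unfold Claim_equal_merge_segment_codes
  intro l _hdom _hpre
  unfold Spec_merge_segment_codes merge_segment_codes merge_segment_codes_alt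
  rw [pvFoldA_eq]
  dsimp only
  set dA := l.foldl (fun d p => d.insert p.1 (pvValA d p)) PySem.Dict.empty with hdA
  set dB := l.foldl (fun d p => d.modify p.1 [] (fun g => g ++ [p.2])) PySem.Dict.empty with hdB
  have hKA : dA.keys = PySem.Set.ofList (l.map Prod.fst) := by
    rw [hdA, PySem.Dict.keys_foldl_insert_key]
    simp [PySem.Set.update_nil_left]
  have hKB : dB.keys = PySem.Set.ofList (l.map Prod.fst) := by
    rw [hdB, PySem.Dict.keys_foldl_modify_key]
    simp [PySem.Set.update_nil_left]
  have hndA : dA.keys.Nodup := by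
    rw [hdA]; exact PySem.Dict.nodup_keys_foldl_insert_key l Prod.fst _ _ (by simp)
  have hndB : dB.keys.Nodup := by
    rw [hdB]; exact PySem.Dict.nodup_keys_foldl_modify_key l Prod.fst [] _ _ (by simp)
  rw [PySem.Dict.items_eq_map_keys dA hndA "", PySem.Dict.items_eq_map_keys dB hndB [],
      hKA, hKB, List.map_map, List.map_map]
  apply List.map_congr_left
  intro k hk
  have hk' : k ∈ l.map Prod.fst := (PySem.Set.mem_ofList _ _).mp hk
  obtain ⟨p, hp, hpk⟩ := List.mem_map.mp hk'
  -- the group of k is nonempty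
  have hpf : p ∈ l.filter (fun q => q.1 == k) := by
    rw [List.mem_filter]; exact ⟨hp, by simp [hpk]⟩
  have hBv : dB.getD k [] = (l.filter (fun q => q.1 == k)).map (·.2) := by
    rw [hdB]
    rw [PySem.Dict.getD_foldl_modify_append]
    simp
  have hgrp : (l.filter (fun q => q.1 == k)).map (·.2) ≠ [] := by
    simp only [ne_eq, List.map_eq_nil_iff]
    intro h; rw [h] at hpf; exact (List.not_mem_nil).elim hpf
  obtain ⟨h0, tl, hht⟩ := List.exists_cons_of_ne_nil hgrp
  have hAv : dA.get? k = some (tl.foldl (fun cur t => pvHMax cur t) h0) := by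
    rw [hdA, pvGetA, PySem.Dict.get?_empty, hht]
    show pvRedo (some h0) tl = _
    exact pvRedo_some tl h0
  have : dA.getD k "" = tl.foldl (fun cur t => pvHMax cur t) h0 := by
    rw [PySem.Dict.getD_eq_get?_getD, hAv]; rfl
  simp only [Function.comp, this, hBv, hht, pvReduceGroup]
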